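-- pv_equiv track=rewrite | github.com/Wanninors/M2-Code-correcteur | DecodeBch15Serial.py | bch_encode_15_7
-- ===== SOURCE A (Python) =====
-- def bch_encode_15_7(binary_message):
--     generator = [1, 1, 1, 0, 1, 0, 0, 0, 1]  # g(x) pour BCH(15,7)
--
--     # Convertir le message binaire en liste d'entiers
--     binary_message = [int(bit) for bit in binary_message]
--
--     # Ajouter les bits redondants (x^8)
--     shifted_message = binary_message + [0] * 8
--
--     # Diviser par le polynôme générateur pour calculer le reste
--     remainder = shifted_message[:]
--     for i in range(len(binary_message)):
--         if remainder[i] == 1: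
--             for j in range(len(generator)):
--                 remainder[i + j] ^= generator[j]
--
--     # Ajouter le reste aux bits d'information
--     encoded_message = binary_message + remainder[len(binary_message):]
--
--     return encoded_message
-- ===== SOURCE B (Python) =====
-- def bch_encode_15_7(binary_message):
--     # LFSR systematic encoder: one pass, 8-cell parity register, no (n+8)-element
--     # remainder array and no inner 9-step division loop.
--     taps = [1, 1, 0, 1, 0, 0, 0, 1]  # g(x) = 1 + x + x^2 + x^4 + x^8, low coefficients after the leading 1
--     msg = [int(bit) for bit in binary_message]
--     reg = [0] * 8
--     for b in msg:
--         fb = b ^ reg[0]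
--         reg = reg[1:] + [0]
--         if fb == 1:
--             reg = [r ^ t for r, t in zip(reg, taps)]
--     return msg + reg
-- ===== Notes on version B (the rewrite author's own statement) =====
-- stated objective: alternative
-- what changed: Replaced the (n+8)-cell remainder array with its nested 9-step XOR division loop by a one-pass LFSR systematic encoder that keeps only an 8-cell parity register updated per message bit.
import Mathlib
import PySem

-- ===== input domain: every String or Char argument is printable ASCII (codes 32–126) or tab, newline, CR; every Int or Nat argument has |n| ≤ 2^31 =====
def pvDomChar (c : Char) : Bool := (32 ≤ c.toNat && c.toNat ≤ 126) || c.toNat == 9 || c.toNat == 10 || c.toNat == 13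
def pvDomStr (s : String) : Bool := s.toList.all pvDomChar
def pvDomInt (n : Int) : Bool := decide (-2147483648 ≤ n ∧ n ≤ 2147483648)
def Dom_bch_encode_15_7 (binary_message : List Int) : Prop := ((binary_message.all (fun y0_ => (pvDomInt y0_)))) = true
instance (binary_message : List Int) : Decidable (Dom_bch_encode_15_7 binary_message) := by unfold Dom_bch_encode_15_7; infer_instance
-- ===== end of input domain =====

-- B replaces A's (n+8)-cell remainder array and inner 9-step polynomial-division loop by a
-- one-pass LFSR systematic encoder keeping only an 8-cell parity register (objective: alternative).

-- ===== PORT A =====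
def bch_encode_15_7 (binary_message : List Int) : List Int :=
  let generator : List Int := [1, 1, 1, 0, 1, 0, 0, 0, 1]
  -- int(bit) applied to an int is the int itself
  let msg := binary_message.map (fun bit => bit)
  let shifted_message := msg ++ List.replicate 8 0
  -- remainder[i] is always read/written in range, so getD/set are exact for Python indexing
  let remainder := (List.range msg.length).foldl (fun rem i =>
    if rem.getD i 0 == 1 then
      (List.range generator.length).foldl
        (fun r j => r.set (i + j) (PySem.Int.bxor (r.getD (i + j) 0) (generator.getD j 0))) rem
    else rem) shifted_message
  msg ++ remainder.drop msg.length

-- ===== PORT B =====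
def bch_encode_15_7_alt (binary_message : List Int) : List Int :=
  let taps : List Int := [1, 1, 0, 1, 0, 0, 0, 1]
  let msg := binary_message.map (fun bit => bit)
  let reg := msg.foldl (fun reg b =>
    let fb := PySem.Int.bxor b (reg.headD 0)
    let reg2 := reg.drop 1 ++ [0]
    if fb == 1 then (reg2.zip taps).map (fun p => PySem.Int.bxor p.1 p.2) else reg2)
    (List.replicate 8 0)
  msg ++ reg

-- ===== PRECONDITION & SPEC =====
def Spec_bch_encode_15_7 (binary_message : List Int) (out : List Int) : Prop := out = bch_encode_15_7_alt binary_message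
instance (binary_message : List Int) (out : List Int) : Decidable (Spec_bch_encode_15_7 binary_message out) := by unfold Spec_bch_encode_15_7; infer_instance

-- ===== CLAIM (what is proved, stated in full; the proofs are below) =====
def Claim_equal_bch_encode_15_7 : Prop := ∀ (binary_message : List Int), Dom_bch_encode_15_7 binary_message → Spec_bch_encode_15_7 binary_message (bch_encode_15_7 binary_message)

-- ===== LEMMAS AND PROOFS =====

-- Python's ^ (PySem.Int.bxor) is associative.
theorem pv_bxor_assoc (a b c : Int) :
    PySem.Int.bxor (PySem.Int.bxor a b) c = PySem.Int.bxor a (PySem.Int.bxor b c) := by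
  unfold PySem.Int.bxor
  by_cases ha : (0:ℤ) ≤ a <;> by_cases hb : (0:ℤ) ≤ b <;> by_cases hc : (0:ℤ) ≤ c <;>
    simp [ha, hb, hc, Nat.xor_assoc] <;>
    (try rw [if_neg (by omega), if_neg (by omega)]) <;>
    (try intro h) <;> omega

theorem pv_zero_bxor (a : Int) : PySem.Int.bxor 0 a = a := by
  rw [PySem.Int.bxor_comm]; simp

-- xor a mask list elementwise into the front of a list
def pvXorMask : List Int → List Int → List Int
  | [], l => l
  | _ :: _, [] => []
  | c :: cs, x :: xs => PySem.Int.bxor x c :: pvXorMask cs xs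

def pvGen : List Int := [1, 1, 1, 0, 1, 0, 0, 0, 1]

-- one step of A's division, expressed on the not-yet-processed tail of the remainder
def pvDivStep (t : List Int) : List Int :=
  (if t.headD 0 == 1 then pvXorMask pvGen t else t).drop 1

def pvDivRun : ℕ → List Int → List Int
  | 0, t => t
  | m + 1, t => pvDivRun m (pvDivStep t)

-- the body of B's fold (taps inlined)
def pvStepB (reg : List Int) (b : Int) : List Int :=
  let fb := PySem.Int.bxor b (reg.headD 0)
  let reg2 := reg.drop 1 ++ [0]
  if fb == 1 then (reg2.zip [1, 1, 0, 1, 0, 0, 0, 1]).map (fun p => PySem.Int.bxor p.1 p.2) else reg2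

-- the body of A's outer loop (generator inlined)
def pvStepA (rem : List Int) (i : ℕ) : List Int :=
  if rem.getD i 0 == 1 then
    (List.range ([1, 1, 1, 0, 1, 0, 0, 0, 1] : List Int).length).foldl
      (fun r j => r.set (i + j) (PySem.Int.bxor (r.getD (i + j) 0)
        (([1, 1, 1, 0, 1, 0, 0, 0, 1] : List Int).getD j 0))) rem
  else rem

theorem pvXorMask_length (cs l : List Int) : (pvXorMask cs l).length = l.length := by
  induction cs generalizing l with
  | nil => rfl
  | cons c cs ih => cases l with
    | nil => rfl
    | cons x xs => simp [pvXorMask, ih]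

theorem pvXorMask_zero (k : ℕ) (l : List Int) : pvXorMask (List.replicate k 0) l = l := by
  induction k generalizing l with
  | zero => rfl
  | succ k ih => cases l with
    | nil => rfl
    | cons x xs => simp [List.replicate_succ, pvXorMask, ih]

theorem pvXorMask_on_zeros (cs : List Int) : pvXorMask cs (List.replicate cs.length 0) = cs := by
  induction cs with
  | nil => rfl
  | cons c cs ih => simp [List.replicate_succ, pvXorMask, ih, pv_zero_bxor]

theorem pvXorMask_pad (cs l : List Int) : pvXorMask (cs ++ [0]) l = pvXorMask cs l := by
  induction cs generalizing l with
  | nil => cases l with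
    | nil => rfl
    | cons x xs => simp [pvXorMask]
  | cons c cs ih => cases l with
    | nil => rfl
    | cons x xs => simp [pvXorMask, ih]

theorem pvXorMask_comp (a : List Int) : ∀ (b l : List Int), a.length = b.length →
    pvXorMask a (pvXorMask b l) =
      pvXorMask (List.zipWith (fun x y => PySem.Int.bxor x y) b a) l := by
  induction a with
  | nil => intro b l h; cases b with
    | nil => rfl
    | cons d ds => simp at h
  | cons c cs ih =>
    intro b l h
    cases b with
    | nil => simp at h
    | cons d ds =>
      cases l with
      | nil => rfl
      | cons x xs =>
        simp only [pvXorMask, List.zipWith]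
        simp only [List.length_cons, Nat.add_right_cancel_iff] at h
        rw [ih ds xs h, pv_bxor_assoc]

theorem pv_headD_drop (l : List Int) : ∀ i : ℕ, (l.drop i).headD 0 = l.getD i 0 := by
  induction l with
  | nil => intro i; simp [List.getD]
  | cons x xs ih => intro i; cases i with
    | zero => rfl
    | succ i => exact ih i

theorem pv_zip_map_eq_zipWith (xs ys : List Int) :
    (xs.zip ys).map (fun p => PySem.Int.bxor p.1 p.2) =
      List.zipWith (fun x y => PySem.Int.bxor x y) xs ys := by
  induction xs generalizing ys with
  | nil => rfl
  | cons x xs ih => cases ys with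
    | nil => rfl
    | cons y ys => simp [List.zip_cons_cons, ih]

-- A's inner loop is exactly "xor the coefficient list cs into positions i, i+1, …"
theorem pv_inner (cs : List Int) : ∀ (i : ℕ) (rem : List Int), i + cs.length ≤ rem.length →
    (List.range cs.length).foldl
      (fun r j => r.set (i + j) (PySem.Int.bxor (r.getD (i + j) 0) (cs.getD j 0))) rem
      = rem.take i ++ pvXorMask cs (rem.drop i) := by
  induction cs with
  | nil => intro i rem _; simp [pvXorMask]
  | cons c cs ih =>
    intro i rem h
    have hi : i < rem.length := by simp at h; omega
    rw [List.length_cons, List.range_succ_eq_map, List.foldl_cons, List.foldl_map]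
    have hfun : (fun (r : List Int) (j : ℕ) =>
        r.set (i + Nat.succ j) (PySem.Int.bxor (r.getD (i + Nat.succ j) 0) ((c :: cs).getD (Nat.succ j) 0)))
        = fun (r : List Int) (j : ℕ) =>
        r.set ((i + 1) + j) (PySem.Int.bxor (r.getD ((i + 1) + j) 0) (cs.getD j 0)) := by
      funext r j
      have : i + Nat.succ j = (i + 1) + j := by omega
      simp [this, List.getD]
    rw [hfun]
    have hv : (c :: cs).getD 0 0 = c := rfl
    set v := PySem.Int.bxor (rem.getD (i + 0) 0) ((c :: cs).getD 0 0) with hvdef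
    have hlen : (rem.set (i + 0) v).length = rem.length := by simp
    rw [ih (i + 1) (rem.set (i + 0) v) (by simp at h ⊢; omega)]
    have hset : rem.set (i + 0) v = rem.take i ++ v :: rem.drop (i + 1) := by
      simp only [Nat.add_zero]
      rw [List.set_eq_take_append_cons_drop, if_pos hi]
    have hdrop : rem.drop i = rem[i] :: rem.drop (i + 1) := (List.drop_eq_getElem_cons hi)
    rw [hset]
    have hti : (rem.take i).length = i := by simp; omega
    have htake : (rem.take i ++ v :: rem.drop (i + 1)).take (i + 1) = rem.take i ++ [v] := by
      rw [List.take_append, hti]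
      simp [List.take_take]
    have hdrop2 : (rem.take i ++ v :: rem.drop (i + 1)).drop (i + 1) = rem.drop (i + 1) := by
      rw [List.drop_append, hti]
      simp [List.drop_eq_nil_of_le, hti]
    rw [htake, hdrop2, hdrop]
    have hvv : v = PySem.Int.bxor rem[i] c := by
      rw [hvdef, hv]; congr 1; simpa using (List.getD_eq_getElem rem 0 hi)
    simp [pvXorMask, hvv]

theorem pvStepA_take_drop (rem : List Int) (i : ℕ) (h : i + 9 ≤ rem.length) :
    pvStepA rem i = rem.take i ++ (if rem.getD i 0 == 1 then pvXorMask pvGen (rem.drop i) else rem.drop i) := by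
  unfold pvStepA
  by_cases hc : rem.getD i 0 == 1
  · rw [if_pos hc, if_pos hc,
      pv_inner ([1, 1, 1, 0, 1, 0, 0, 0, 1] : List Int) i rem (by simpa using h)]
    rfl
  · rw [if_neg hc, if_neg hc, List.take_append_drop]

theorem pvStepA_length (rem : List Int) (i : ℕ) (h : i + 9 ≤ rem.length) :
    (pvStepA rem i).length = rem.length := by
  rw [pvStepA_take_drop rem i h]
  by_cases hc : rem.getD i 0 == 1
  · rw [if_pos hc]
    simp [pvXorMask_length]
    omega
  · rw [if_neg hc]
    simp

theorem pvStepA_drop (rem : List Int) (i : ℕ) (h : i + 9 ≤ rem.length) :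
    (pvStepA rem i).drop (i + 1) = pvDivStep (rem.drop i) := by
  rw [pvStepA_take_drop rem i h]
  unfold pvDivStep
  rw [pv_headD_drop]
  have hti : (rem.take i).length = i := by simp; omega
  by_cases hc : rem.getD i 0 == 1
  · rw [if_pos hc]
    rw [List.drop_append, hti]
    simp [List.drop_eq_nil_of_le]
  · rw [if_neg hc]
    rw [List.drop_append, hti]
    simp [List.drop_eq_nil_of_le]

-- A's outer loop, viewed through "drop the processed prefix", is iterated pvDivStep
theorem pv_outer (m : ℕ) : ∀ (i : ℕ) (rem : List Int), rem.length = i + m + 8 →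
    ((List.range' i m).foldl pvStepA rem).drop (i + m) = pvDivRun m (rem.drop i) := by
  induction m with
  | zero => intro i rem _; simp [pvDivRun]
  | succ m ih =>
    intro i rem h
    rw [List.range'_succ, List.foldl_cons]
    have h9 : i + 9 ≤ rem.length := by omega
    have hlen : (pvStepA rem i).length = (i + 1) + m + 8 := by rw [pvStepA_length rem i h9]; omega
    have := ih (i + 1) (pvStepA rem i) hlen
    rw [show i + (m + 1) = (i + 1) + m by omega, this, pvStepA_drop rem i h9]
    rfl

-- the bridge: iterated division on (masked) message ++ zeros = B's LFSR register fold
theorem pv_bridge (xs : List Int) : ∀ (reg : List Int), reg.length = 8 →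
    pvDivRun xs.length (pvXorMask reg (xs ++ List.replicate 8 0)) = xs.foldl pvStepB reg := by
  induction xs with
  | nil =>
    intro reg h
    simp only [List.length_nil, List.nil_append, List.foldl_nil, pvDivRun]
    rw [show (8 : ℕ) = reg.length from h.symm, pvXorMask_on_zeros]
  | cons b bs ih =>
    intro reg h
    cases reg with
    | nil => simp at h
    | cons r0 rt =>
      have hrt : rt.length = 7 := by simpa using h
      simp only [List.length_cons, List.cons_append, pvXorMask, pvDivRun, List.foldl_cons]
      have hstep : pvStepB (r0 :: rt) b =
          if PySem.Int.bxor b r0 == 1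
          then List.zipWith (fun x y => PySem.Int.bxor x y) (rt ++ [0]) [1, 1, 0, 1, 0, 0, 0, 1]
          else rt ++ [0] := by
        unfold pvStepB
        simp only [List.headD_cons, List.drop_succ_cons, List.drop_zero]
        by_cases hc : PySem.Int.bxor b r0 == 1 <;> simp [hc, pv_zip_map_eq_zipWith]
      by_cases hc : PySem.Int.bxor b r0 == 1
      · have hfb : PySem.Int.bxor b r0 = 1 := by simpa using hc
        have hds : pvDivStep (PySem.Int.bxor b r0 :: pvXorMask rt (bs ++ List.replicate 8 0)) =
            pvXorMask (List.zipWith (fun x y => PySem.Int.bxor x y) (rt ++ [0]) [1, 1, 0, 1, 0, 0, 0, 1])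
              (bs ++ List.replicate 8 0) := by
          unfold pvDivStep
          rw [hfb]
          simp only [List.headD_cons, BEq.rfl, if_pos]
          show (pvXorMask pvGen (1 :: pvXorMask rt (bs ++ List.replicate 8 0))).drop 1 = _
          have : pvXorMask pvGen (1 :: pvXorMask rt (bs ++ List.replicate 8 0)) =
              PySem.Int.bxor 1 1 :: pvXorMask [1, 1, 0, 1, 0, 0, 0, 1] (pvXorMask rt (bs ++ List.replicate 8 0)) := rfl
          rw [this, List.drop_succ_cons, List.drop_zero,
            ← pvXorMask_pad rt (bs ++ List.replicate 8 0),
            pvXorMask_comp _ _ _ (by simp [hrt])]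
        rw [hds, ih _ (by simp [List.length_zipWith, hrt]), hstep, if_pos hc]
      · have hds : pvDivStep (PySem.Int.bxor b r0 :: pvXorMask rt (bs ++ List.replicate 8 0)) =
            pvXorMask (rt ++ [0]) (bs ++ List.replicate 8 0) := by
          unfold pvDivStep
          simp only [List.headD_cons, hc, if_neg, Bool.false_eq_true, not_false_iff]
          rw [List.drop_succ_cons, List.drop_zero, pvXorMask_pad]
        rw [hds, ih _ (by simp [hrt]), hstep, if_neg (by simpa using hc)]

-- ===== VERDICT (by name: the statement is the Claim_ definition above) =====
theorem bch_encode_15_7_spec : Claim_equal_bch_encode_15_7 := by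
  intro bm _
  unfold Spec_bch_encode_15_7 bch_encode_15_7 bch_encode_15_7_alt
  have hmap : bm.map (fun bit => bit) = bm := List.map_id' bm
  simp only [hmap]
  congr 1
  show ((List.range bm.length).foldl pvStepA (bm ++ List.replicate 8 0)).drop bm.length
      = List.foldl pvStepB (List.replicate 8 0) bm
  have hlen : (bm ++ List.replicate 8 0).length = 0 + bm.length + 8 := by simp
  have houter := pv_outer bm.length 0 (bm ++ List.replicate 8 0) hlen
  rw [← List.range_eq_range'] at houter
  have hA : ((List.range bm.length).foldl pvStepA (bm ++ List.replicate 8 0)).drop bm.length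
      = pvDivRun bm.length (bm ++ List.replicate 8 0) := by simpa using houter
  have hmask : bm ++ List.replicate 8 0 = pvXorMask (List.replicate 8 0) (bm ++ List.replicate 8 0) :=
    (pvXorMask_zero 8 _).symm
  rw [hA, hmask, pv_bridge bm (List.replicate 8 0) (by simp)]
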